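-- pv_equiv track=rewrite | github.com/wmthompson1/product-ontime-analysis | enhanced_google_doc_parser.py | create_character_grid
-- ===== SOURCE A (Python) =====
-- def create_character_grid(characters):
--     """
--     Create a 2D grid from character data with error handling
--
--     Args:
--         characters (list): List of tuples (character, x, y)
--
--     Returns:
--         list: 2D grid of characters
--     """
--     if not characters:
--         return []
--
--     # Find grid dimensions
--     max_x = max(char[1] for char in characters)
--     max_y = max(char[2] for char in characters)
--     min_x = min(char[1] for char in characters)
--     min_y = min(char[2] for char in characters)
--
--     # Adjust for negative coordinates
--     offset_x = abs(min_x) if min_x < 0 else 0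
--     offset_y = abs(min_y) if min_y < 0 else 0
--
--     width = max_x + offset_x + 1
--     height = max_y + offset_y + 1
--
--     # Create grid filled with spaces
--     grid = [[' ' for _ in range(width)] for _ in range(height)]
--
--     # Place characters in grid
--     for char, x, y in characters:
--         adjusted_x = x + offset_x
--         adjusted_y = y + offset_y
--         if 0 <= adjusted_x < width and 0 <= adjusted_y < height:
--             grid[adjusted_y][adjusted_x] = char
--
--     return grid
-- ===== SOURCE B (Python) =====
-- def create_character_grid(characters):
--     """Build the same 2D grid, but with one min/max pass and a coordinate
--     dictionary looked up per cell instead of a mutated grid."""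
--     if not characters:
--         return []
--
--     _, x0, y0 = characters[0]
--     min_x = max_x = x0
--     min_y = max_y = y0
--     for _, x, y in characters:
--         if x < min_x:
--             min_x = x
--         if x > max_x:
--             max_x = x
--         if y < min_y:
--             min_y = y
--         if y > max_y:
--             max_y = y
--
--     ox = -min_x if min_x < 0 else 0
--     oy = -min_y if min_y < 0 else 0
--
--     placed = {(x, y): ch for ch, x, y in characters}
--
--     return [[placed.get((x - ox, y - oy), ' ')
--              for x in range(max_x + ox + 1)]
--             for y in range(max_y + oy + 1)]
-- ===== Notes on version B (the rewrite author's own statement) =====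
-- stated objective: alternative
-- what changed: The four separate min/max generator scans become one explicit extremes pass, and the mutate-grid placement loop is replaced by a (x,y)->char dictionary built once and looked up per cell while the grid is built by comprehension (last duplicate wins in both).
import Mathlib
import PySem

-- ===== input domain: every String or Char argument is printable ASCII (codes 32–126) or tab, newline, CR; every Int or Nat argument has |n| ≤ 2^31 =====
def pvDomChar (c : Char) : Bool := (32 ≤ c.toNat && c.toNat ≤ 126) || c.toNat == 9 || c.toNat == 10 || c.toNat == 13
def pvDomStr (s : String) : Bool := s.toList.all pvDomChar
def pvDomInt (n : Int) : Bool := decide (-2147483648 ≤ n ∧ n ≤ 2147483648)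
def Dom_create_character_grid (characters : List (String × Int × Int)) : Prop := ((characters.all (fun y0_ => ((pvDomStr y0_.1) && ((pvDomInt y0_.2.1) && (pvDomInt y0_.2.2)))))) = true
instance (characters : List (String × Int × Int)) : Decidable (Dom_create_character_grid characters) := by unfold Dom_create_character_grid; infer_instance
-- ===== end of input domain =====

-- B replaces A's four min/max generator scans and its mutate-the-grid placement loop by one
-- extremes pass plus a coordinate→char dictionary looked up while comprehending the grid
-- (objective: alternative decomposition, same result).

-- ===== PORT A =====
-- loop body of A's placement loop ('for char, x, y in characters: … grid[adjusted_y][adjusted_x] = char')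
def pvPlaceA (offset_x offset_y width height : Int)
    (g : List (List String)) (c : String × Int × Int) : List (List String) :=
  let adjusted_x := c.2.1 + offset_x
  let adjusted_y := c.2.2 + offset_y
  if 0 ≤ adjusted_x ∧ adjusted_x < width ∧ 0 ≤ adjusted_y ∧ adjusted_y < height then
    g.modify adjusted_y.toNat (fun row => row.set adjusted_x.toNat c.1)
  else g

def create_character_grid (characters : List (String × Int × Int)) : List (List String) :=
  if characters = [] then []
  else
    let max_x : Int := (PySem.List.max? (characters.map (fun c => c.2.1)) (fun v => v)).getD 0
    let max_y : Int := (PySem.List.max? (characters.map (fun c => c.2.2)) (fun v => v)).getD 0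
    let min_x : Int := (PySem.List.min? (characters.map (fun c => c.2.1)) (fun v => v)).getD 0
    let min_y : Int := (PySem.List.min? (characters.map (fun c => c.2.2)) (fun v => v)).getD 0
    let offset_x : Int := if min_x < 0 then |min_x| else 0
    let offset_y : Int := if min_y < 0 then |min_y| else 0
    let width := max_x + offset_x + 1
    let height := max_y + offset_y + 1
    let grid := (PySem.List.pyRange 0 height 1).map
      (fun _ => (PySem.List.pyRange 0 width 1).map (fun _ => (" " : String)))
    characters.foldl (pvPlaceA offset_x offset_y width height) grid

-- ===== PORT B =====
-- loop body of B's single extremes pass (state = (min_x, max_x, min_y, max_y))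
def pvExtremesStep (s : Int × Int × Int × Int) (c : String × Int × Int) : Int × Int × Int × Int :=
  (if c.2.1 < s.1 then c.2.1 else s.1,
   if c.2.1 > s.2.1 then c.2.1 else s.2.1,
   if c.2.2 < s.2.2.1 then c.2.2 else s.2.2.1,
   if c.2.2 > s.2.2.2 then c.2.2 else s.2.2.2)

def create_character_grid_alt (characters : List (String × Int × Int)) : List (List String) :=
  match characters with
  | [] => []
  | c0 :: _ =>
    let st := characters.foldl pvExtremesStep (c0.2.1, c0.2.1, c0.2.2, c0.2.2)
    let ox : Int := if st.1 < 0 then -st.1 else 0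
    let oy : Int := if st.2.2.1 < 0 then -st.2.2.1 else 0
    let placed : PySem.Dict (Int × Int) String :=
      characters.foldl (fun d c => d.insert (c.2.1, c.2.2) c.1) PySem.Dict.empty
    (PySem.List.pyRange 0 (st.2.2.2 + oy + 1) 1).map (fun y =>
      (PySem.List.pyRange 0 (st.2.1 + ox + 1) 1).map (fun x =>
        placed.getD (x - ox, y - oy) " "))

-- ===== PRECONDITION & SPEC =====
def Spec_create_character_grid (characters : List (String × Int × Int)) (out : List (List String)) : Prop := out = create_character_grid_alt characters
instance (characters : List (String × Int × Int)) (out : List (List String)) : Decidable (Spec_create_character_grid characters out) := by unfold Spec_create_character_grid; infer_instance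

-- ===== CLAIM (what is proved, stated in full; the proofs are below) =====
def Claim_equal_create_character_grid : Prop := ∀ (characters : List (String × Int × Int)), Dom_create_character_grid characters → Spec_create_character_grid characters (create_character_grid characters)

-- ===== LEMMAS AND PROOFS =====

-- total cell accessor used by the invariant
def pvCell (g : List (List String)) (j i : Nat) : String := (g.getD j []).getD i " "

-- B's 4-tuple fold decomposes into four independent min/max folds
lemma pvExtremes_eq (l : List (String × Int × Int)) (a b c d : Int) :
    l.foldl pvExtremesStep (a, b, c, d) =
      (l.foldl (fun m p => min m p.2.1) a,
       l.foldl (fun m p => max m p.2.1) b,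
       l.foldl (fun m p => min m p.2.2) c,
       l.foldl (fun m p => max m p.2.2) d) := by
  induction l generalizing a b c d with
  | nil => rfl
  | cons p t ih =>
    have h1 : (if p.2.1 < a then p.2.1 else a) = min a p.2.1 := by
      rw [Int.min_def]; split_ifs <;> omega
    have h2 : (if p.2.1 > b then p.2.1 else b) = max b p.2.1 := by
      rw [Int.max_def]; split_ifs <;> omega
    have h3 : (if p.2.2 < c then p.2.2 else c) = min c p.2.2 := by
      rw [Int.min_def]; split_ifs <;> omega
    have h4 : (if p.2.2 > d then p.2.2 else d) = max d p.2.2 := by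
      rw [Int.max_def]; split_ifs <;> omega
    simp only [List.foldl_cons, pvExtremesStep, h1, h2, h3, h4, ih]

lemma pvRows_modify (g : List (List String)) (n i : Nat) (s : String) (W : Nat)
    (hrow : ∀ row ∈ g, row.length = W) :
    ∀ row ∈ g.modify n (fun r => r.set i s), row.length = W := by
  intro row hmem
  rw [List.mem_iff_getElem] at hmem
  obtain ⟨k, hk, hkeq⟩ := hmem
  rw [List.getElem_modify] at hkeq
  have hk' : k < g.length := by simpa [List.length_modify] using hk
  split at hkeq
  · rw [← hkeq, List.length_set]
    exact hrow _ (List.getElem_mem hk')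
  · rw [← hkeq]
    exact hrow _ (List.getElem_mem hk')

-- placement loop vs dictionary: the grid cells track the dict lookups
lemma pvGrid_invariant (ox oy width height : Int) (l : List (String × Int × Int))
    (g : List (List String)) (d : PySem.Dict (Int × Int) String)
    (hg : g.length = height.toNat)
    (hrow : ∀ row ∈ g, row.length = width.toNat)
    (hcell : ∀ j i : Nat, j < height.toNat → i < width.toNat →
      pvCell g j i = ((d.get? ((i : Int) - ox, (j : Int) - oy)).getD " ")) :
    (l.foldl (pvPlaceA ox oy width height) g).length = height.toNat ∧
    (∀ row ∈ l.foldl (pvPlaceA ox oy width height) g, row.length = width.toNat) ∧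
    (∀ j i : Nat, j < height.toNat → i < width.toNat →
      pvCell (l.foldl (pvPlaceA ox oy width height) g) j i =
        (((l.foldl (fun d c => d.insert (c.2.1, c.2.2) c.1) d).get?
            ((i : Int) - ox, (j : Int) - oy)).getD " ")) := by
  induction l generalizing g d with
  | nil => exact ⟨hg, hrow, hcell⟩
  | cons c t ih =>
    simp only [List.foldl_cons]
    by_cases hcond : 0 ≤ c.2.1 + ox ∧ c.2.1 + ox < width ∧ 0 ≤ c.2.2 + oy ∧ c.2.2 + oy < height
    · -- the character lands inside the grid
      have hplace : pvPlaceA ox oy width height g c =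
          g.modify (c.2.2 + oy).toNat (fun row => row.set (c.2.1 + ox).toNat c.1) := by
        simp only [pvPlaceA, if_pos hcond]
      rw [hplace]
      apply ih
      · simp [List.length_modify, hg]
      · exact pvRows_modify g _ _ _ _ hrow
      · intro j i hj hi
        have hjg : j < g.length := by omega
        have hrlen : g[j].length = width.toNat := hrow _ (List.getElem_mem hjg)
        have hcellget : pvCell g j i = g[j].getD i " " := by
          unfold pvCell; rw [List.getD_eq_getElem g [] hjg]
        by_cases hkey : ((i : Int) - ox, (j : Int) - oy) = (c.2.1, c.2.2)
        · have h1 : (i : Int) - ox = c.2.1 := congrArg Prod.fst hkey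
          have h2 : (j : Int) - oy = c.2.2 := congrArg Prod.snd hkey
          have hjn : (c.2.2 + oy).toNat = j := by omega
          have hin : (c.2.1 + ox).toNat = i := by omega
          have hlhs : pvCell (g.modify (c.2.2 + oy).toNat
              (fun row => row.set (c.2.1 + ox).toNat c.1)) j i = c.1 := by
            unfold pvCell
            rw [List.getD_eq_getElem _ [] (by simp [List.length_modify]; omega),
              List.getElem_modify, if_pos hjn,
              List.getD_eq_getElem _ " " (by simp [List.length_set]; omega),
              List.getElem_set, if_pos hin]
          rw [hlhs, hkey, PySem.Dict.get?_insert_self]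
          rfl
        · have hget := PySem.Dict.get?_insert_of_ne d c.1 hkey
          rw [hget]
          have hlhs : pvCell (g.modify (c.2.2 + oy).toNat
              (fun row => row.set (c.2.1 + ox).toNat c.1)) j i = pvCell g j i := by
            unfold pvCell
            rw [List.getD_eq_getElem _ [] (by simp [List.length_modify]; omega),
              List.getElem_modify]
            by_cases hjn : (c.2.2 + oy).toNat = j
            · rw [if_pos hjn]
              have hin : (c.2.1 + ox).toNat ≠ i := by
                intro hin
                exact hkey (by rw [Prod.mk.injEq]; constructor <;> omega)
              rw [List.getD_eq_getElem _ " " (by simp [List.length_set]; omega),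
                List.getElem_set, if_neg hin,
                List.getD_eq_getElem g [] hjg, List.getD_eq_getElem _ " " (by omega)]
            · rw [if_neg hjn, List.getD_eq_getElem g [] hjg]
          rw [hlhs]
          exact hcell j i hj hi
    · -- out of bounds: the grid is unchanged, and no cell maps to this key
      have hplace : pvPlaceA ox oy width height g c = g := by
        simp only [pvPlaceA, if_neg hcond]
      rw [hplace]
      refine ih _ _ hg hrow ?_
      intro j i hj hi
      have hkey : ((i : Int) - ox, (j : Int) - oy) ≠ (c.2.1, c.2.2) := by
        intro hkey
        have h1 : (i : Int) - ox = c.2.1 := congrArg Prod.fst hkey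
        have h2 : (j : Int) - oy = c.2.2 := congrArg Prod.snd hkey
        exact hcond ⟨by omega, by omega, by omega, by omega⟩
      rw [PySem.Dict.get?_insert_of_ne d c.1 hkey]
      exact hcell j i hj hi

-- ===== VERDICT (by name: the statement is the Claim_ definition above) =====
theorem create_character_grid_spec : Claim_equal_create_character_grid := by
  intro characters _
  unfold Spec_create_character_grid
  match characters with
  | [] => rfl
  | c0 :: rest =>
    have hne : (c0 :: rest : List (String × Int × Int)) ≠ [] := by simp
    rw [create_character_grid, if_neg hne]
    show _ = create_character_grid_alt (c0 :: rest)
    rw [create_character_grid_alt]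
    -- the four extremes agree
    have hmaxx : (PySem.List.max? ((c0 :: rest).map (fun c => c.2.1)) (fun v => v)).getD 0
        = rest.foldl (fun m p => max m p.2.1) c0.2.1 := by
      rw [List.map_cons, PySem.List.max?_id_cons, Option.getD_some, List.foldl_map]
    have hmaxy : (PySem.List.max? ((c0 :: rest).map (fun c => c.2.2)) (fun v => v)).getD 0
        = rest.foldl (fun m p => max m p.2.2) c0.2.2 := by
      rw [List.map_cons, PySem.List.max?_id_cons, Option.getD_some, List.foldl_map]
    have hminx : (PySem.List.min? ((c0 :: rest).map (fun c => c.2.1)) (fun v => v)).getD 0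
        = rest.foldl (fun m p => min m p.2.1) c0.2.1 := by
      rw [List.map_cons, PySem.List.min?_id_cons, Option.getD_some, List.foldl_map]
    have hminy : (PySem.List.min? ((c0 :: rest).map (fun c => c.2.2)) (fun v => v)).getD 0
        = rest.foldl (fun m p => min m p.2.2) c0.2.2 := by
      rw [List.map_cons, PySem.List.min?_id_cons, Option.getD_some, List.foldl_map]
    have hst : (c0 :: rest).foldl pvExtremesStep (c0.2.1, c0.2.1, c0.2.2, c0.2.2)
        = (rest.foldl (fun m p => min m p.2.1) c0.2.1,
           rest.foldl (fun m p => max m p.2.1) c0.2.1,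
           rest.foldl (fun m p => min m p.2.2) c0.2.2,
           rest.foldl (fun m p => max m p.2.2) c0.2.2) := by
      rw [List.foldl_cons]
      have h0 : pvExtremesStep (c0.2.1, c0.2.1, c0.2.2, c0.2.2) c0
          = (c0.2.1, c0.2.1, c0.2.2, c0.2.2) := by
        simp [pvExtremesStep]
      rw [h0, pvExtremes_eq]
    simp only [hmaxx, hmaxy, hminx, hminy, hst]
    set MinX := rest.foldl (fun m p => min m p.2.1) c0.2.1 with hMinX
    set MaxX := rest.foldl (fun m p => max m p.2.1) c0.2.1 with hMaxX
    set MinY := rest.foldl (fun m p => min m p.2.2) c0.2.2 with hMinY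
    set MaxY := rest.foldl (fun m p => max m p.2.2) c0.2.2 with hMaxY
    have habsx : (if MinX < 0 then |MinX| else 0) = (if MinX < 0 then -MinX else 0) := by
      split_ifs with h
      · rw [abs_of_neg h]
      · rfl
    have habsy : (if MinY < 0 then |MinY| else 0) = (if MinY < 0 then -MinY else 0) := by
      split_ifs with h
      · rw [abs_of_neg h]
      · rfl
    simp only [habsx, habsy]
    set ox : Int := if MinX < 0 then -MinX else 0 with hox
    set oy : Int := if MinY < 0 then -MinY else 0 with hoy
    set W : Int := MaxX + ox + 1 with hW
    set H : Int := MaxY + oy + 1 with hH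
    set grid0 : List (List String) := (PySem.List.pyRange 0 H 1).map
      (fun _ => (PySem.List.pyRange 0 W 1).map (fun _ => (" " : String))) with hgrid0
    set placed : PySem.Dict (Int × Int) String :=
      (c0 :: rest).foldl (fun d c => d.insert (c.2.1, c.2.2) c.1) PySem.Dict.empty with hplaced
    have hg0 : grid0.length = H.toNat := by
      simp [hgrid0, PySem.List.length_pyRange_one]
    have hrow0 : ∀ row ∈ grid0, row.length = W.toNat := by
      intro row hmem
      rw [hgrid0, List.mem_map] at hmem
      obtain ⟨_, _, hrow⟩ := hmem
      rw [← hrow]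
      simp [PySem.List.length_pyRange_one]
    have hcell0 : ∀ j i : Nat, j < H.toNat → i < W.toNat →
        pvCell grid0 j i = (((PySem.Dict.empty : PySem.Dict (Int × Int) String).get?
          ((i : Int) - ox, (j : Int) - oy)).getD " ") := by
      intro j i hj hi
      have hjl : j < grid0.length := by omega
      have hil : i < ((PySem.List.pyRange 0 W 1).map (fun _ => (" " : String))).length := by
        simp [PySem.List.length_pyRange_one]; omega
      unfold pvCell
      rw [List.getD_eq_getElem grid0 [] hjl]
      have hj0 : grid0[j] = (PySem.List.pyRange 0 W 1).map (fun _ => (" " : String)) := by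
        simp [hgrid0]
      rw [hj0, List.getD_eq_getElem _ " " hil]
      simp [PySem.Dict.empty, PySem.Dict.get?]
    obtain ⟨hlen, hrows, hcells⟩ :=
      pvGrid_invariant ox oy W H (c0 :: rest) grid0 PySem.Dict.empty hg0 hrow0 hcell0
    apply List.ext_getElem
    · rw [hlen]
      simp [PySem.List.length_pyRange_one]
    intro j h1 h2
    apply List.ext_getElem
    · have hmem := List.getElem_mem h1
      rw [hrows _ hmem]
      have h2' := h2
      rw [List.getElem_map]
      simp [PySem.List.length_pyRange_one]
    intro i hi1 hi2
    have hjH : j < H.toNat := by rw [hlen] at h1; exact h1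
    have hiW : i < W.toNat := by
      have hmem := List.getElem_mem h1
      rw [hrows _ hmem] at hi1
      exact hi1
    have hA : ((c0 :: rest).foldl (pvPlaceA ox oy W H) grid0)[j][i]
        = pvCell ((c0 :: rest).foldl (pvPlaceA ox oy W H) grid0) j i := by
      unfold pvCell
      rw [List.getD_eq_getElem _ [] h1, List.getD_eq_getElem _ " " hi1]
    rw [hA, hcells j i hjH hiW]
    simp only [List.getElem_map, PySem.List.getElem_pyRange_one, zero_add]
    rfl
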